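-- pv_equiv track=rewrite | github.com/Fabo01/Proyecto-PIII-EV2 | frontend/ui/red.py | obtener_objetos_por_ids
-- ===== SOURCE A (Python) =====
-- def obtener_objetos_por_ids(ids, lista):
--     """
--     Devuelve una lista de objetos válidos asociados a una lista de IDs.
--     """
--     if not ids or not lista:
--         return []
--     resultados = []
--     for ident in ids:
--         for obj in lista:
--             if obj.get('id') == ident or obj.get('id_pedido') == ident:
--                 resultados.append(obj)
--                 break
--     return resultados
-- ===== SOURCE B (Python) =====
-- def obtener_objetos_por_ids(ids, lista):
--     """
--     Devuelve una lista de objetos válidos asociados a una lista de IDs.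
--     """
--     index = {}
--     for obj in lista:
--         for key in (obj.get('id'), obj.get('id_pedido')):
--             if key is not None and key not in index:
--                 index[key] = obj
--     return [index[ident] for ident in ids if ident in index]
-- ===== Notes on version B (the rewrite author's own statement) =====
-- stated objective: faster
-- what changed: Replaces the per-id linear rescan of lista by a single pass that builds a first-wins dict index keyed by each object's 'id' and 'id_pedido' fields, then answers each id by one lookup.
import Mathlib
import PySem

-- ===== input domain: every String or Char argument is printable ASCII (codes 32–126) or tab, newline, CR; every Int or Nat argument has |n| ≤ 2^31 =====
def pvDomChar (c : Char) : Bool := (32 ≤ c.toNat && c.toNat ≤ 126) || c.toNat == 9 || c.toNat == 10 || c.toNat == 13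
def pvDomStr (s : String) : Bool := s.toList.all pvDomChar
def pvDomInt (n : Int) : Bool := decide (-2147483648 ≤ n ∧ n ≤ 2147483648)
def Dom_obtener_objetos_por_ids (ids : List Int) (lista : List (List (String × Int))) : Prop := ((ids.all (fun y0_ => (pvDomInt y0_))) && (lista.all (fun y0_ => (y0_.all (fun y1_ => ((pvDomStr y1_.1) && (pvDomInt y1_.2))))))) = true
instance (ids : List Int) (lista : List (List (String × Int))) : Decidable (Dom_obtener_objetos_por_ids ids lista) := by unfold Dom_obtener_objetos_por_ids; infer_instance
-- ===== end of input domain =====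

-- B replaces A's per-id rescan of lista by a one-pass first-wins dict index plus one lookup per id (asymptotically faster).

-- ===== PORT A =====
-- obj.get(k): first-match lookup in the association list (Python dicts have unique keys; first match is exact)
def pvDget (o : List (String × Int)) (k : String) : Option Int :=
  match o with
  | [] => none
  | (k', v) :: t => if k' = k then some v else pvDget t k

-- the inner 'for obj in lista: … break' loop of A: first object matching ident (none = no break taken)
def pvFindA (ident : Int) : List (List (String × Int)) → Option (List (String × Int))
  | [] => none
  | o :: t =>
    if pvDget o "id" = some ident ∨ pvDget o "id_pedido" = some ident then some o
    else pvFindA ident t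

def obtener_objetos_por_ids (ids : List Int) (lista : List (List (String × Int))) : List (List (String × Int)) :=
  if ids = [] ∨ lista = [] then []
  else
    ids.foldl (fun resultados ident =>
      match pvFindA ident lista with
      | some o => resultados ++ [o]
      | none => resultados) []

-- ===== PORT B =====
-- 'if key is not None and key not in index: index[key] = obj'
def pvAddKey (d : PySem.Dict Int (List (String × Int))) (key : Option Int) (o : List (String × Int)) :
    PySem.Dict Int (List (String × Int)) :=
  match key with
  | none => d
  | some k => if d.contains k then d else d.insert k o

-- the index-building pass over lista
def pvIndex (lista : List (List (String × Int))) : PySem.Dict Int (List (String × Int)) :=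
  lista.foldl (fun d o => pvAddKey (pvAddKey d (pvDget o "id") o) (pvDget o "id_pedido") o) PySem.Dict.empty

def obtener_objetos_por_ids_alt (ids : List Int) (lista : List (List (String × Int))) : List (List (String × Int)) :=
  let index := pvIndex lista
  ids.filterMap (fun ident => index.get? ident)

-- ===== PRECONDITION & SPEC =====
def Spec_obtener_objetos_por_ids (ids : List Int) (lista : List (List (String × Int))) (out : List (List (String × Int))) : Prop := out = obtener_objetos_por_ids_alt ids lista
instance (ids : List Int) (lista : List (List (String × Int))) (out : List (List (String × Int))) : Decidable (Spec_obtener_objetos_por_ids ids lista out) := by unfold Spec_obtener_objetos_por_ids; infer_instance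

-- ===== CLAIM (what is proved, stated in full; the proofs are below) =====
def Claim_equal_obtener_objetos_por_ids : Prop := ∀ (ids : List Int) (lista : List (List (String × Int))), Dom_obtener_objetos_por_ids ids lista → Spec_obtener_objetos_por_ids ids lista (obtener_objetos_por_ids ids lista)

-- ===== LEMMAS AND PROOFS =====

-- one conditional insert, seen through get?
theorem pv_get_addKey (d : PySem.Dict Int (List (String × Int))) (key : Option Int)
    (o : List (String × Int)) (i : Int) :
    (pvAddKey d key o).get? i = (d.get? i).or (if key = some i then some o else none) := by
  match key with
  | none => simp [pvAddKey]
  | some k =>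
    simp only [pvAddKey]
    by_cases hc : d.contains k
    · simp only [hc, if_true]
      by_cases hk : k = i
      · subst hk
        have : (d.get? k).isSome := by rw [← PySem.Dict.contains_eq_isSome_get?]; exact hc
        cases h : d.get? k with
        | none => rw [h] at this; simp at this
        | some v => simp
      · simp [Option.some.injEq, hk]
    · rw [Bool.not_eq_true] at hc
      simp only [hc, Bool.false_eq_true, if_false]
      rw [PySem.Dict.get?_insert]
      by_cases hk : i = k
      · subst hk
        have : d.get? i = none := by
          cases h : d.get? i with
          | none => rfl
          | some v =>
            rw [PySem.Dict.contains_eq_isSome_get?, h] at hc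
            simp at hc
        simp [this]
      · simp only [if_neg hk,
          if_neg (fun h : some k = some i => hk (Option.some.injEq k i ▸ h).symm), Option.or_none]

-- lookup in the index built from lista equals A's inner search, generalized over the accumulator
theorem pv_get_index_aux (lista : List (List (String × Int)))
    (d : PySem.Dict Int (List (String × Int))) (i : Int) :
    (lista.foldl (fun d o => pvAddKey (pvAddKey d (pvDget o "id") o) (pvDget o "id_pedido") o) d).get? i
      = (d.get? i).or (pvFindA i lista) := by
  induction lista generalizing d with
  | nil => simp [pvFindA]
  | cons o t ih =>
    simp only [List.foldl_cons, ih, pv_get_addKey, Option.or_assoc]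
    congr 1
    by_cases h1 : pvDget o "id" = some i
    · simp [pvFindA, h1]
    · by_cases h2 : pvDget o "id_pedido" = some i
      · simp [pvFindA, h1, h2]
      · simp [pvFindA, h1, h2]

theorem pv_get_index (lista : List (List (String × Int))) (i : Int) :
    (pvIndex lista).get? i = pvFindA i lista := by
  simp [pvIndex, pv_get_index_aux]

-- A's outer append-fold is a filterMap of the inner search
theorem pv_foldA_filterMap (ids : List Int) (lista : List (List (String × Int)))
    (acc : List (List (String × Int))) :
    ids.foldl (fun resultados ident =>
      match pvFindA ident lista with
      | some o => resultados ++ [o]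
      | none => resultados) acc
      = acc ++ ids.filterMap (fun ident => pvFindA ident lista) := by
  induction ids generalizing acc with
  | nil => simp
  | cons i t ih =>
    simp only [List.foldl_cons]
    cases h : pvFindA i lista with
    | none => simp [ih, h]
    | some o => simp [ih, h]

-- ===== VERDICT (by name: the statement is the Claim_ definition above) =====
theorem obtener_objetos_por_ids_spec : Claim_equal_obtener_objetos_por_ids := by
  intro ids lista _
  show obtener_objetos_por_ids ids lista = obtener_objetos_por_ids_alt ids lista
  unfold obtener_objetos_por_ids obtener_objetos_por_ids_alt
  simp only [List.filterMap_congr (fun i _ => pv_get_index lista i)]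
  by_cases hids : ids = []
  · simp [hids]
  · by_cases hl : lista = []
    · subst hl
      simp only [hids, or_true, if_true]
      have : ∀ i ∈ ids, pvFindA i ([] : List (List (String × Int))) = none := by
        intro i _; rfl
      rw [List.filterMap_congr this]; simp
    · simp [hids, hl, pv_foldA_filterMap]
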